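-- pv_equiv track=rewrite | github.com/jemtca/CodingBat | Python/List-2/has12.py | has12
-- ===== SOURCE A (Python) =====
-- def has12(nums):
--     b = False
--     success = False
--
--     i = 0
--     while i < len(nums) and not success:
--         if nums[i] == 1:
--             j = i + 1
--             while j < len(nums) and not success:
--                 if nums[j] == 2:
--                     b = True
--                     success = True
--                 j += 1
--         i += 1
--
--     return b
-- ===== SOURCE B (Python) =====
-- def has12(nums):
--     seen_one = False
--     for x in nums:
--         if x == 1:
--             seen_one = True
--         elif seen_one and x == 2:
--             return True
--     return False
-- ===== Notes on version B (the rewrite author's own statement) =====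
-- stated objective: simpler
-- what changed: Replaced the nested index-based while loops and flag bookkeeping by a single forward pass that remembers whether a 1 has been seen and returns early on the first 2 after it (O(n) instead of O(n^2)).
import Mathlib
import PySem

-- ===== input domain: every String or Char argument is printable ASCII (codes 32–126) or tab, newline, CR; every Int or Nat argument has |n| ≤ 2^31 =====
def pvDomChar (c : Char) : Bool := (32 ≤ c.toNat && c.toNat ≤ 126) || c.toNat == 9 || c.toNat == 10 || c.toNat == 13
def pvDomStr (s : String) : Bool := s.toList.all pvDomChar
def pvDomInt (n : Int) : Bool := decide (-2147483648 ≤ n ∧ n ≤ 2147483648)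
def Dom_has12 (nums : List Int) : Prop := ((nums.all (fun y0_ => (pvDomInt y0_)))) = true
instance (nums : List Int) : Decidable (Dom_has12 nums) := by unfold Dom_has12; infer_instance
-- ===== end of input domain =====

-- ===== PORT A =====
-- B changes the algorithm: one forward pass with a seen-a-1 flag instead of A's nested index scans.
-- inner while loop of A: j scans for a 2 from i+1, updating (b, success)
def has12Inner (nums : List Int) (j : Nat) (b success : Bool) : Bool × Bool :=
  if j < nums.length ∧ success = false then
    if nums.getD j 0 = 2 then has12Inner nums (j+1) true true
    else has12Inner nums (j+1) b success
  else (b, success)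
termination_by nums.length - j
decreasing_by all_goals omega

-- outer while loop of A: i scans for a 1, then runs the inner loop
def has12Outer (nums : List Int) (i : Nat) (b success : Bool) : Bool :=
  if i < nums.length ∧ success = false then
    if nums.getD i 0 = 1 then
      match has12Inner nums (i+1) b success with
      | (b', s') => has12Outer nums (i+1) b' s'
    else has12Outer nums (i+1) b success
  else b
termination_by nums.length - i
decreasing_by all_goals omega

def has12 (nums : List Int) : Bool := has12Outer nums 0 false false

-- ===== PORT B =====
-- B: one pass, remember whether a 1 has been seen, early return on a later 2
def has12Go (l : List Int) (seenOne : Bool) : Bool :=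
  match l with
  | [] => false
  | x :: xs =>
    if x = 1 then has12Go xs true
    else if seenOne ∧ x = 2 then true
    else has12Go xs seenOne

def has12_alt (nums : List Int) : Bool := has12Go nums false

-- ===== PRECONDITION & SPEC =====
def Spec_has12 (nums : List Int) (out : Bool) : Prop := out = has12_alt nums
instance (nums : List Int) (out : Bool) : Decidable (Spec_has12 nums out) := by unfold Spec_has12; infer_instance

-- ===== CLAIM (what is proved, stated in full; the proofs are below) =====
def Claim_equal_has12 : Prop := ∀ (nums : List Int), Dom_has12 nums → Spec_has12 nums (has12 nums)

-- ===== LEMMAS AND PROOFS =====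
theorem go_true (l : List Int) : has12Go l true = l.contains 2 := by
  induction l with
  | nil => simp [has12Go]
  | cons x xs ih =>
    rcases eq_or_ne x 1 with h1 | h1
    · subst h1; simp [has12Go, ih]
    · rcases eq_or_ne x 2 with h2 | h2
      · subst h2; simp [has12Go]
      · simp [has12Go, h1, h2, h2.symm, ih]

theorem go_no_two (l : List Int) (s : Bool) (h : l.contains 2 = false) :
    has12Go l s = false := by
  induction l generalizing s with
  | nil => simp [has12Go]
  | cons x xs ih =>
    simp only [List.contains_cons, Bool.or_eq_false_iff] at h
    have h2 : x ≠ 2 := by intro e; subst e; simp at h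
    have hx : xs.contains 2 = false := h.2
    rcases eq_or_ne x 1 with h1 | h1
    · subst h1
      have hx' : (2:Int) ∉ xs := by simpa using hx
      simp [has12Go, go_true, hx']
    · simp [has12Go, h1, h2, ih _ hx]

theorem inner_eq (nums : List Int) (j : Nat) (b : Bool) :
    has12Inner nums j b false =
      if (nums.drop j).contains 2 = true then (true, true) else (b, false) := by
  induction hn : nums.length - j using Nat.strong_induction_on generalizing j b with
  | _ n ih =>
    rw [has12Inner]
    by_cases hj : j < nums.length
    · have hd : nums.drop j = nums[j] :: nums.drop (j+1) := List.drop_eq_getElem_cons hj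
      have hg : nums.getD j 0 = nums[j] := List.getD_eq_getElem nums 0 hj
      rw [if_pos ⟨hj, rfl⟩, hg, hd]
      by_cases h2 : nums[j] = 2
      · have ht : has12Inner nums (j+1) true true = (true, true) := by
          rw [has12Inner]; simp
        rw [if_pos h2, ht, List.contains_cons, h2]
        simp
      · rw [if_neg h2, ih (nums.length - (j+1)) (by omega) (j+1) b rfl,
            List.contains_cons, beq_eq_false_iff_ne.mpr (Ne.symm h2), Bool.false_or]
    · rw [if_neg (by simp [hj]), List.drop_eq_nil_of_le (by omega)]
      simp

theorem outer_eq (nums : List Int) (i : Nat) :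
    has12Outer nums i false false = has12Go (nums.drop i) false := by
  induction hn : nums.length - i using Nat.strong_induction_on generalizing i with
  | _ n ih =>
    rw [has12Outer]
    by_cases hi : i < nums.length
    · have hd : nums.drop i = nums[i] :: nums.drop (i+1) := List.drop_eq_getElem_cons hi
      have hg : nums.getD i 0 = nums[i] := List.getD_eq_getElem nums 0 hi
      rw [if_pos ⟨hi, rfl⟩, hg, hd]
      by_cases h1 : nums[i] = 1
      · rw [if_pos h1, inner_eq]
        by_cases hc : (nums.drop (i+1)).contains 2 = true
        · rw [if_pos hc]
          have ht : has12Outer nums (i+1) true true = true := by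
            rw [has12Outer]; simp
          show has12Outer nums (i+1) true true = _
          rw [ht]
          have hc' : (2:Int) ∈ nums.drop (i+1) := by simpa using hc
          simp [has12Go, h1, go_true, hc']
        · rw [if_neg hc]
          show has12Outer nums (i+1) false false = _
          rw [ih (nums.length - (i+1)) (by omega) (i+1) rfl]
          have hx : (nums.drop (i+1)).contains 2 = false := by
            simpa using hc
          rw [go_no_two _ _ hx]
          have hx' : (2:Int) ∉ nums.drop (i+1) := by simpa using hc
          simp [has12Go, h1, go_true, hx']
      · rw [if_neg h1, ih (nums.length - (i+1)) (by omega) (i+1) rfl]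
        simp [has12Go, h1]
    · rw [if_neg (by simp [hi]), List.drop_eq_nil_of_le (by omega)]
      simp [has12Go]

-- ===== VERDICT =====
theorem has12_spec : Claim_equal_has12 := by
  intro nums _
  unfold Spec_has12 has12 has12_alt
  simpa using outer_eq nums 0
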